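-- pv_equiv track=rewrite | github.com/menisadi/pydp | src/qualities.py | min_max_maximum_quality
-- ===== SOURCE A (Python) =====
-- def iterlen(it):
--     """
--     a length of generator
--     :param it: generator object
--     :return: the number of items in it
--     """
--     return sum(1 for _ in it)
--
-- def min_max_maximum_quality(data, interval):
--     greater_than = iterlen(x for x in data if x > interval[0])
--     less_than = len(data) - greater_than
--     after_domain = iterlen(x for x in data if x > interval[1])
--     while greater_than > less_than and greater_than > after_domain:
--         greater_than -= 1
--         less_than += 1
--     return min(less_than, greater_than)
-- ===== SOURCE B (Python) =====
-- def min_max_maximum_quality(data, interval):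
--     n = len(data)
--     greater_than = sum(1 for x in data if x > interval[0])
--     after_domain = sum(1 for x in data if x > interval[1])
--     g = min(greater_than, max(n // 2, after_domain))
--     return min(n - g, g)
-- ===== Notes on version B (the rewrite author's own statement) =====
-- stated objective: simpler
-- what changed: The decrement while-loop is replaced by a closed-form stopping value: g = min(greater_than, max(n//2, after_domain)), returning min(n-g, g).
import Mathlib
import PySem

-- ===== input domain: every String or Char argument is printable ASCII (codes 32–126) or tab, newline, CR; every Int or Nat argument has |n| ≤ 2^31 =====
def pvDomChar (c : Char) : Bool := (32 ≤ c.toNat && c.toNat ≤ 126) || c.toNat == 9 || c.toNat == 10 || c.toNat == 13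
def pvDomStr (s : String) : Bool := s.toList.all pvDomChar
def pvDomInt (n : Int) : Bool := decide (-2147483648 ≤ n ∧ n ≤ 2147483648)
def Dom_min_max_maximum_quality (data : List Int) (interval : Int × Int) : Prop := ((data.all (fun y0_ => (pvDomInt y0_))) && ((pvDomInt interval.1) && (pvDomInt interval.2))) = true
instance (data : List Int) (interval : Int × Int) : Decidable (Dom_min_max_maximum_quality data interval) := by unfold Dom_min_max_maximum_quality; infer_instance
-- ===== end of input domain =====

-- B replaces A's decrement while-loop with the closed-form stopping value g = min(gt, max(n//2, ad)); objective: simpler.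


-- ===== PORT A =====
-- iterlen(x for x in data if x > t): a fold counting the matching elements, one by one
def pvIterlenGt (data : List Int) (t : Int) : Int :=
  data.foldl (fun acc x => if x > t then acc + 1 else acc) 0

-- the while loop; fuel = initial greater_than (it strictly decreases each iteration)
def pvLoopA (fuel : Nat) (gt lt ad : Int) : Int :=
  match fuel with
  | 0 => min lt gt
  | f + 1 => if gt > lt ∧ gt > ad then pvLoopA f (gt - 1) (lt + 1) ad else min lt gt

def min_max_maximum_quality (data : List Int) (interval : Int × Int) : Int :=
  let greater_than := pvIterlenGt data interval.1
  let less_than := (data.length : Int) - greater_than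
  let after_domain := pvIterlenGt data interval.2
  pvLoopA greater_than.toNat greater_than less_than after_domain

-- ===== PORT B =====
def min_max_maximum_quality_alt (data : List Int) (interval : Int × Int) : Int :=
  let n := (data.length : Int)
  let greater_than := data.foldl (fun acc x => if x > interval.1 then acc + 1 else acc) 0
  let after_domain := data.foldl (fun acc x => if x > interval.2 then acc + 1 else acc) 0
  let g := min greater_than (max (PySem.Int.floordiv n 2) after_domain)
  min (n - g) g

-- ===== PRECONDITION & SPEC =====
def Spec_min_max_maximum_quality (data : List Int) (interval : Int × Int) (out : Int) : Prop := out = min_max_maximum_quality_alt data interval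
instance (data : List Int) (interval : Int × Int) (out : Int) : Decidable (Spec_min_max_maximum_quality data interval out) := by unfold Spec_min_max_maximum_quality; infer_instance

-- ===== CLAIM (what is proved, stated in full; the proofs are below) =====
def Claim_equal_min_max_maximum_quality : Prop := ∀ (data : List Int) (interval : Int × Int), Dom_min_max_maximum_quality data interval → Spec_min_max_maximum_quality data interval (min_max_maximum_quality data interval)

-- ===== LEMMAS AND PROOFS =====

-- the count is between 0 and the list length
theorem pvIterlenGt_bounds (data : List Int) (t : Int) :
    0 ≤ pvIterlenGt data t ∧ pvIterlenGt data t ≤ (data.length : Int) := by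
  unfold pvIterlenGt
  suffices h : ∀ a : Int, a ≤ data.foldl (fun acc x => if x > t then acc + 1 else acc) a ∧
      data.foldl (fun acc x => if x > t then acc + 1 else acc) a ≤ a + (data.length : Int) by
    have := h 0; simpa using this
  induction data with
  | nil => intro a; simp
  | cons x xs ih =>
    intro a
    have h1 := ih (a + 1)
    have h2 := ih a
    simp only [List.foldl_cons, List.length_cons]
    split <;> push_cast <;> omega

-- the loop equals the closed form, given enough fuel and the stated invariants
theorem pvLoopA_closed (f : Nat) (gt lt ad : Int)
    (hg : 0 ≤ gt) (hl : 0 ≤ lt) (ha : 0 ≤ ad) (hf : gt ≤ (f : Int)) :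
    pvLoopA f gt lt ad =
      min (gt + lt - min gt (max (PySem.Int.floordiv (gt + lt) 2) ad))
          (min gt (max (PySem.Int.floordiv (gt + lt) 2) ad)) := by
  have hpos : (0 : Int) < 2 := by omega
  induction f generalizing gt lt with
  | zero =>
    have hgt0 : gt = 0 := by exact_mod_cast le_antisymm (by simpa using hf) hg
    subst hgt0
    rw [PySem.Int.floordiv_eq_ediv_of_pos hpos]
    simp only [pvLoopA]
    omega
  | succ f ih =>
    simp only [pvLoopA]
    split
    · rename_i hcond
      obtain ⟨h1, h2⟩ := hcond
      rw [ih (gt - 1) (lt + 1) (by omega) (by omega) (by push_cast at hf ⊢; omega)]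
      have heq : gt - 1 + (lt + 1) = gt + lt := by ring
      rw [heq]
      rw [PySem.Int.floordiv_eq_ediv_of_pos hpos]
      omega
    · rename_i hcond
      rw [Decidable.not_and_iff_or_not] at hcond
      rw [PySem.Int.floordiv_eq_ediv_of_pos hpos]
      rcases hcond with h | h <;> simp only [not_lt] at h <;> omega

-- ===== VERDICT (by name: the statement is the Claim_ definition above) =====
theorem min_max_maximum_quality_spec : Claim_equal_min_max_maximum_quality := by
  intro data interval _
  unfold Spec_min_max_maximum_quality min_max_maximum_quality min_max_maximum_quality_alt
  obtain ⟨hg0, hgn⟩ := pvIterlenGt_bounds data interval.1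
  obtain ⟨ha0, _⟩ := pvIterlenGt_bounds data interval.2
  have hfuel : pvIterlenGt data interval.1 ≤ ((pvIterlenGt data interval.1).toNat : Int) := by
    omega
  rw [pvLoopA_closed _ _ _ _ hg0 (by omega) ha0 hfuel]
  show _ = min ((data.length : Int) - _) _
  have hsum : pvIterlenGt data interval.1 + ((data.length : Int) - pvIterlenGt data interval.1) = (data.length : Int) := by ring
  rw [hsum]
  unfold pvIterlenGt
  omega
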